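-- pv_equiv track=rewrite | github.com/sashaaero/binarysearch-problems | problems/harder/short_circuit.py | solve
-- ===== SOURCE A (Python) =====
-- from collections import deque, defaultdict
--
-- def solve(words):
--     data = []
--     ends = defaultdict(lambda: 1)
--     starts = defaultdict(lambda: 1)
--     data = defaultdict(list)
--     init = words[0][0]
--
--     for w in words:
--         a, b = w[0], w[-1]
--         data[a].append(b)
--         starts[a] += 1
--         ends[b] += 1
--
--     seen = set()
--
--     def dfs(node):
--         seen.add(node)
--         for n in data[node]:
--             if n not in seen:
--                 dfs(n)
--
--     dfs(init)
--     for n in data: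
--         if n not in seen or starts[n] != ends[n]:
--             return False
--
--     return True
-- ===== SOURCE B (Python) =====
-- def solve(words):
--     init = words[0][0]
--     data = {}
--     starts = {}
--     ends = {}
--     for w in words:
--         a, b = w[0], w[-1]
--         data.setdefault(a, []).append(b)
--         starts[a] = starts.get(a, 0) + 1
--         ends[b] = ends.get(b, 0) + 1
--     seen = {init}
--     stack = [init]
--     while stack:
--         node = stack.pop()
--         for n in data.get(node, []):
--             if n not in seen:
--                 seen.add(n)
--                 stack.append(n)
--     return all(n in seen and starts.get(n, 0) == ends.get(n, 0) for n in data)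
-- ===== Notes on version B (the rewrite author's own statement) =====
-- stated objective: alternative
-- what changed: Replaces the recursive DFS (which also mutates the defaultdict, enlarging the key set iterated by the final check) with an iterative explicit-stack traversal over plain dicts, and the early-return degree loop with all(); equivalence of the final loops over the different key sets rests on a degree-sum argument.
import Mathlib
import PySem

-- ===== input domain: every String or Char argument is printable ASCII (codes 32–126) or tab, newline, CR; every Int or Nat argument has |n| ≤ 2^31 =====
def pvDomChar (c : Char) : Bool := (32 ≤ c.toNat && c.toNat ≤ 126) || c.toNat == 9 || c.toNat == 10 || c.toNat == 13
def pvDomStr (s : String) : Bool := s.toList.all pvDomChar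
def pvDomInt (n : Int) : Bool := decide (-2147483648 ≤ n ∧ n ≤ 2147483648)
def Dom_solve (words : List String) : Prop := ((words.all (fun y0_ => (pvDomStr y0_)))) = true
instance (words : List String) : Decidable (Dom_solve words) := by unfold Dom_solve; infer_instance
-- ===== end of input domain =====

-- B replaces A's recursive DFS by an iterative explicit-stack traversal over plain dicts
-- (no defaultdict mutation during the traversal) and the early-return check loop by all().

-- ===== PORT A =====
-- A's dfs threads (data, seen): Python's `data[node]` on a defaultdict INSERTS a missing
-- key with [], so the dict iterated by the final loop grows during the traversal.
-- `fuel` is only a totality guard; with the fuel solve passes it is never exhausted.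
def dfsA (fuel : Nat) (st : PySem.Dict Char (List Char) × PySem.Set Char) (node : Char) :
    PySem.Dict Char (List Char) × PySem.Set Char :=
  match fuel with
  | 0 => st
  | f + 1 =>
    let seen := PySem.Set.add st.2 node
    let data := if st.1.contains node then st.1 else st.1.insert node []
    (data.getD node []).foldl
      (fun st n => if PySem.Set.contains st.2 n then st else dfsA f st n) (data, seen)

-- A's final loop with its early `return False`
def checkA (seen : PySem.Set Char) (starts ends : PySem.Dict Char Int) : List Char → Bool
  | [] => true
  | n :: rest =>
    if ¬ (PySem.Set.contains seen n) ∨ starts.getD n 1 ≠ ends.getD n 1 then false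
    else checkA seen starts ends rest

def solve (words : List String) : Bool :=
  match PySem.List.pyGet? words 0 with
  | none => false            -- Python: IndexError on words[0] (excluded by Pre_solve)
  | some w0 =>
  match PySem.Str.pyGet? w0 0 with
  | none => false            -- Python: IndexError on words[0][0] (excluded by Pre_solve)
  | some init =>
    let st := words.foldl (fun st w =>
        match PySem.Str.pyGet? w 0, PySem.Str.pyGet? w (-1) with
        | some a, some b =>
          (st.1.modify a [] (· ++ [b]), st.2.1.modify a (1 : Int) (· + 1), st.2.2.modify b (1 : Int) (· + 1))
        | _, _ => st)        -- Python: IndexError on an empty word (excluded by Pre_solve)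
      (PySem.Dict.empty, PySem.Dict.empty, PySem.Dict.empty)
    let r := dfsA (2 * words.length + 1) (st.1, PySem.Set.empty) init
    checkA r.2 st.2.1 st.2.2 r.1.keys

-- ===== PORT B =====
-- B's while loop: stack top at the list head (pop() = head, append = cons).
-- `fuel` is only a totality guard; with the fuel solve_alt passes it is never exhausted.
def loopB (data : PySem.Dict Char (List Char)) :
    Nat → PySem.Set Char → List Char → PySem.Set Char
  | 0, seen, _ => seen
  | _ + 1, seen, [] => seen
  | f + 1, seen, node :: rest =>
    let p := (data.getD node []).foldl
      (fun (p : PySem.Set Char × List Char) n =>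
        if PySem.Set.contains p.1 n then p else (PySem.Set.add p.1 n, n :: p.2)) (seen, rest)
    loopB data f p.1 p.2

def solve_alt (words : List String) : Bool :=
  match PySem.List.pyGet? words 0 with
  | none => false            -- Python: IndexError on words[0] (excluded by Pre_solve)
  | some w0 =>
  match PySem.Str.pyGet? w0 0 with
  | none => false            -- Python: IndexError on words[0][0] (excluded by Pre_solve)
  | some init =>
    let st := words.foldl (fun st w =>
        match PySem.Str.pyGet? w 0 with
        | none => st         -- Python: IndexError on an empty word (excluded by Pre_solve)
        | some a =>
          match PySem.Str.pyGet? w (-1) with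
          | none => st
          | some b =>
            (st.1.modify a [] (· ++ [b]),     -- data.setdefault(a, []).append(b)
             st.2.1.insert a (st.2.1.getD a (0 : Int) + 1),
             st.2.2.insert b (st.2.2.getD b (0 : Int) + 1)))
      (PySem.Dict.empty, PySem.Dict.empty, PySem.Dict.empty)
    let seen := loopB st.1 (2 * words.length + 2) (PySem.Set.add PySem.Set.empty init) [init]
    st.1.keys.all (fun n => PySem.Set.contains seen n && (st.2.1.getD n (0 : Int) == st.2.2.getD n (0 : Int)))

-- ===== PRECONDITION & SPEC =====
-- Pre_solve excludes exactly the inputs where both Pythons raise IndexError: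
-- the empty list (words[0]) and any empty word (w[0] / w[-1]).
def Pre_solve (words : List String) : Prop := words ≠ [] ∧ ∀ w ∈ words, w ≠ ""
instance (words : List String) : Decidable (Pre_solve words) := by unfold Pre_solve; infer_instance
def pvWitness_solve : List String := (["ab", "ba"])

def Spec_solve (words : List String) (out : Bool) : Prop := out = solve_alt words
instance (words : List String) (out : Bool) : Decidable (Spec_solve words out) := by unfold Spec_solve; infer_instance

-- ===== CLAIM (what is proved, stated in full; the proofs are below) =====
def Claim_equal_solve : Prop := ∀ (words : List String), Dom_solve words → Pre_solve words → Spec_solve words (solve words)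

-- ===== LEMMAS AND PROOFS =====

lemma list_pyGet?_zero {α : Type} (x : α) (xs : List α) :
    PySem.List.pyGet? (x :: xs) 0 = some x := by
  simp [PySem.List.pyGet?, PySem.List.pyIdx?]

-- the first / last character of a nonempty word
def fstC (w : String) : Char := w.toList.headI
def lstC (w : String) : Char := w.toList.getLastI

-- number of characters of `univ` not yet seen (termination measure of both traversals)
def unseenN (univ : List Char) (s : PySem.Set Char) : Nat :=
  univ.dedup.countP (fun c => !(PySem.Set.contains s c))

lemma pyGet?_zero (c : Char) (cs : List Char) :
    PySem.Chars.pyGet? (c :: cs) 0 = some c := by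
  simp [PySem.Chars.pyGet?, PySem.List.pyGet?, PySem.List.pyIdx?]

lemma countP_lt_of (l : List Char) (p q : Char → Bool)
    (hpq : ∀ a ∈ l, q a = true → p a = true) (x : Char) (hx : x ∈ l)
    (hp : p x = true) (hq : q x = false) : l.countP q < l.countP p := by
  induction l with
  | nil => cases hx
  | cons a t ih =>
    rcases List.mem_cons.mp hx with rfl | hxt
    · have := List.countP_mono_left (l := t) (p := q) (q := p)
        (fun b hb => hpq b (List.mem_cons_of_mem _ hb))
      simp [hp, hq]
      omega
    · have := ih (fun b hb => hpq b (List.mem_cons_of_mem _ hb)) hxt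
      have ha : q a = true → p a = true := hpq a List.mem_cons_self
      simp only [List.countP_cons]
      by_cases hqa : q a = true
      · simp [hqa, ha hqa]; omega
      · simp only [Bool.not_eq_true] at hqa
        simp [hqa]
        by_cases hpa : p a = true <;> simp [hpa] <;> omega

lemma pyGet?_neg_one (cs : List Char) (h : cs ≠ []) :
    PySem.Chars.pyGet? cs (-1) = some cs.getLastI := by
  have hl : 0 < cs.length := List.length_pos_of_ne_nil h
  simp only [PySem.Chars.pyGet?, PySem.List.pyGet?, PySem.List.pyIdx?]
  rw [if_neg (by omega), if_pos (by omega)]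
  have h1 : (-(-1 : Int)).toNat = 1 := rfl
  have h2 : ((some (cs.length - 1)).bind fun k => cs[k]?) = cs[cs.length - 1]? := rfl
  rw [h1, h2, ← List.getLast?_eq_getElem?, List.getLastI_eq_getLast?_getD]
  cases hc : cs.getLast? with
  | none => rw [List.getLast?_eq_none_iff] at hc; exact absurd hc h
  | some c => rfl

lemma str_pyGet?_zero (w : String) (h : w ≠ "") :
    PySem.Str.pyGet? w 0 = some (fstC w) := by
  have hl : w.toList ≠ [] := fun hc => h (String.toList_eq_nil_iff.mp hc)
  rw [PySem.Str.pyGet?]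
  cases hc : w.toList with
  | nil => exact absurd hc hl
  | cons c cs => rw [pyGet?_zero]; simp [fstC, hc]

lemma str_pyGet?_neg_one (w : String) (h : w ≠ "") :
    PySem.Str.pyGet? w (-1) = some (lstC w) := by
  have hl : w.toList ≠ [] := fun hc => h (String.toList_eq_nil_iff.mp hc)
  rw [PySem.Str.pyGet?, pyGet?_neg_one _ hl, lstC]

lemma set_contains_iff (s : PySem.Set Char) (x : Char) :
    PySem.Set.contains s x = true ↔ x ∈ s := by
  simp [PySem.Set.contains]

lemma unseenN_mono (univ : List Char) (s t : PySem.Set Char)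
    (h : ∀ x ∈ s, x ∈ t) : unseenN univ t ≤ unseenN univ s := by
  apply List.countP_mono_left
  intro x _ hx
  have hxt : x ∉ t := by
    intro hm
    rw [Bool.not_eq_true', ← Bool.not_eq_true] at hx
    exact hx (by rw [set_contains_iff]; exact hm)
  have hxs : x ∉ s := fun hm => hxt (h x hm)
  simp [hxs]

lemma unseenN_strict (univ : List Char) (s t : PySem.Set Char) (x : Char)
    (hxu : x ∈ univ) (hxs : x ∉ s) (hxt : x ∈ t) (h : ∀ y ∈ s, y ∈ t) :
    unseenN univ t < unseenN univ s := by
  apply countP_lt_of _ _ _ _ x (List.mem_dedup.mpr hxu)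
  · simp [hxs]
  · simp [hxt]
  · intro a _ ha
    rw [Bool.not_eq_true'] at ha ⊢
    rw [← Bool.not_eq_true] at ha ⊢
    intro hc
    exact ha (by rw [set_contains_iff] at hc ⊢; exact h a hc)


-- loop step of A's dfs, and the invariant carried through its neighbour fold
def stepA (f : Nat) (st : PySem.Dict Char (List Char) × PySem.Set Char) (n : Char) :
    PySem.Dict Char (List Char) × PySem.Set Char :=
  if PySem.Set.contains st.2 n then st else dfsA f st n

def InvA (univ : List Char) (g : Char → List Char) (f : Nat)
    (data : PySem.Dict Char (List Char)) (seen : PySem.Set Char) (node : Char)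
    (st : PySem.Dict Char (List Char) × PySem.Set Char) : Prop :=
  (∀ x, st.1.getD x [] = g x) ∧
  (∀ x, (x ∈ seen ∨ x = node) → x ∈ st.2) ∧
  (∀ x ∈ st.2, x ∈ seen ∨ Relation.ReflTransGen (fun u v => v ∈ g u) node x) ∧
  (∀ y ∈ st.2, y ∉ seen → y ≠ node → ∀ x ∈ g y, x ∈ st.2) ∧
  (∀ x, st.1.contains x = true ↔ (data.contains x = true ∨ (x ∈ st.2 ∧ x ∉ seen))) ∧
  unseenN univ st.2 < f ∧ unseenN univ st.2 < unseenN univ seen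

-- characterisation of A's dfs
lemma dfsA_spec (univ : List Char) (g : Char → List Char)
    (hGU : ∀ y, ∀ x ∈ g y, x ∈ univ) :
    ∀ (f : Nat) (data : PySem.Dict Char (List Char)) (seen : PySem.Set Char) (node : Char),
    (∀ x, data.getD x [] = g x) → node ∈ univ → node ∉ seen →
    unseenN univ seen < f →
    (∀ x, (dfsA f (data, seen) node).1.getD x [] = g x) ∧
    (∀ x ∈ seen, x ∈ (dfsA f (data, seen) node).2) ∧
    node ∈ (dfsA f (data, seen) node).2 ∧
    (∀ x ∈ (dfsA f (data, seen) node).2,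
      x ∈ seen ∨ Relation.ReflTransGen (fun u v => v ∈ g u) node x) ∧
    (∀ y ∈ (dfsA f (data, seen) node).2, y ∉ seen →
      ∀ x ∈ g y, x ∈ (dfsA f (data, seen) node).2) ∧
    (∀ x, (dfsA f (data, seen) node).1.contains x = true ↔
      (data.contains x = true ∨ (x ∈ (dfsA f (data, seen) node).2 ∧ x ∉ seen))) ∧
    unseenN univ (dfsA f (data, seen) node).2 < unseenN univ seen := by
  intro f
  induction f with
  | zero => intro data seen node _ _ _ hf; exact absurd hf (Nat.not_lt_zero _)
  | succ f IH =>
    intro data seen node hdata hnU hnS hf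
    set data' := if data.contains node then data else data.insert node [] with hdata'def
    have hd'getD : ∀ x, data'.getD x [] = g x := by
      intro x
      rw [hdata'def]
      by_cases hc : data.contains node = true
      · rw [if_pos hc]; exact hdata x
      · rw [if_neg hc, PySem.Dict.getD_insert]
        by_cases hx : x = node
        · rw [if_pos hx, ← hdata x, hx]
          exact (PySem.Dict.getD_of_not_contains _ _ (by rw [Bool.not_eq_true] at hc; exact hc)).symm
        · rw [if_neg hx]; exact hdata x
    have hd'cont : ∀ x, data'.contains x = true ↔ (data.contains x = true ∨ x = node) := by
      intro x
      rw [hdata'def]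
      by_cases hc : data.contains node = true
      · rw [if_pos hc]
        constructor
        · exact Or.inl
        · rintro (h | rfl)
          · exact h
          · exact hc
      · rw [if_neg hc, PySem.Dict.contains_insert]
        simp [beq_iff_eq, or_comm]
    have hstep : dfsA (f + 1) (data, seen) node
        = (g node).foldl (stepA f) (data', PySem.Set.add seen node) := by
      have h0 : dfsA (f + 1) (data, seen) node
          = (data'.getD node []).foldl (stepA f) (data', PySem.Set.add seen node) := rfl
      rw [h0, hd'getD]
    have hsub0 : ∀ x ∈ seen, x ∈ PySem.Set.add seen node :=
      fun x hx => (PySem.Set.mem_add seen node x).mpr (Or.inl hx)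
    have hstrict0 : unseenN univ (PySem.Set.add seen node) < unseenN univ seen :=
      unseenN_strict univ seen _ node hnU hnS
        ((PySem.Set.mem_add seen node node).mpr (Or.inr rfl)) hsub0
    have aux : ∀ (l : List Char), (∀ x ∈ l, x ∈ g node) →
        ∀ st, InvA univ g f data seen node st →
        InvA univ g f data seen node (l.foldl (stepA f) st) ∧
        (∀ x ∈ st.2, x ∈ (l.foldl (stepA f) st).2) ∧
        (∀ x ∈ l, x ∈ (l.foldl (stepA f) st).2) := by
      intro l
      induction l with
      | nil =>
        intro _ st hst
        exact ⟨hst, fun x hx => hx, by simp⟩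
      | cons n l ihl =>
        intro hl st hst
        obtain ⟨stD, stS⟩ := st
        obtain ⟨h1, h2, h3, h4, h5, h6, h7⟩ := hst
        have hnG : n ∈ g node := hl n List.mem_cons_self
        have hnU' : n ∈ univ := hGU node n hnG
        rw [List.foldl_cons]
        by_cases hns : n ∈ stS
        · have hco : PySem.Set.contains (stD, stS).2 n = true := (set_contains_iff _ _).mpr hns
          have hse : stepA f (stD, stS) n = (stD, stS) := by
            unfold stepA
            rw [if_pos hco]
          rw [hse]
          obtain ⟨ha, hb, hc⟩ := ihl (fun x hx => hl x (List.mem_cons_of_mem _ hx)) (stD, stS)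
            ⟨h1, h2, h3, h4, h5, h6, h7⟩
          refine ⟨ha, hb, fun x hx => ?_⟩
          rcases List.mem_cons.mp hx with rfl | hx
          · exact hb _ hns
          · exact hc x hx
        · have hco : PySem.Set.contains (stD, stS).2 n = false := by
            rw [← Bool.not_eq_true]
            intro hc
            exact hns ((set_contains_iff _ _).mp hc)
          have hse : stepA f (stD, stS) n = dfsA f (stD, stS) n := by
            unfold stepA
            rw [if_neg (by rw [hco]; exact Bool.false_ne_true)]
          rw [hse]
          replace h6 : unseenN univ stS < f := h6
          replace h7 : unseenN univ stS < unseenN univ seen := h7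
          obtain ⟨r1, r2, r3, r4, r5, r6, r7⟩ := IH stD stS n h1 hnU' hns h6
          have hseensub : ∀ x, x ∈ seen → x ∈ stS := fun x hx => h2 x (Or.inl hx)
          have hInvR : InvA univ g f data seen node (dfsA f (stD, stS) n) := by
            refine ⟨r1, fun x hx => r2 x (h2 x hx), ?_, ?_, ?_, by omega, by omega⟩
            · intro x hx
              rcases r4 x hx with hx' | hx'
              · exact h3 x hx'
              · exact Or.inr (Relation.ReflTransGen.head hnG hx')
            · intro y hy hyseen hynode x hxg
              by_cases hyS : y ∈ stS
              · exact r2 x (h4 y hyS hyseen hynode x hxg)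
              · exact r5 y hy hyS x hxg
            · intro x
              rw [r6 x, h5 x]
              constructor
              · rintro ((hd | ⟨hx1, hx2⟩) | ⟨hx1, hx2⟩)
                · exact Or.inl hd
                · exact Or.inr ⟨r2 x hx1, hx2⟩
                · exact Or.inr ⟨hx1, fun hc => hx2 (hseensub x hc)⟩
              · rintro (hd | ⟨hx1, hx2⟩)
                · exact Or.inl (Or.inl hd)
                · by_cases hyS : x ∈ stS
                  · exact Or.inl (Or.inr ⟨hyS, hx2⟩)
                  · exact Or.inr ⟨hx1, hyS⟩
          obtain ⟨ha, hb, hc⟩ := ihl (fun x hx => hl x (List.mem_cons_of_mem _ hx)) _ hInvR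
          refine ⟨ha, fun x hx => hb x (r2 x hx), fun x hx => ?_⟩
          rcases List.mem_cons.mp hx with rfl | hx
          · exact hb _ r3
          · exact hc x hx
    have inv0 : InvA univ g f data seen node (data', PySem.Set.add seen node) := by
      refine ⟨hd'getD, ?_, ?_, ?_, ?_, ?_, hstrict0⟩
      · intro x hx
        rcases hx with hx | rfl
        · exact hsub0 x hx
        · exact (PySem.Set.mem_add _ _ _).mpr (Or.inr rfl)
      · intro x hx
        rcases (PySem.Set.mem_add seen node x).mp hx with hx | rfl
        · exact Or.inl hx
        · exact Or.inr Relation.ReflTransGen.refl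
      · intro y hy hyseen hynode x hxg
        rcases (PySem.Set.mem_add seen node y).mp hy with hy | rfl
        · exact absurd hy hyseen
        · exact absurd rfl hynode
      · intro x
        rw [hd'cont x]
        constructor
        · rintro (hd | rfl)
          · exact Or.inl hd
          · exact Or.inr ⟨(PySem.Set.mem_add _ _ _).mpr (Or.inr rfl), hnS⟩
        · rintro (hd | ⟨hx1, hx2⟩)
          · exact Or.inl hd
          · rcases (PySem.Set.mem_add seen node x).mp hx1 with hx | rfl
            · exact absurd hx hx2
            · exact Or.inr rfl
      · show unseenN univ (PySem.Set.add seen node) < f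
        omega
    obtain ⟨⟨i1, i2, i3, i4, i5, i6, i7⟩, hmonoF, hallF⟩ :=
      aux (g node) (fun x hx => hx) (data', PySem.Set.add seen node) inv0
    rw [hstep]
    refine ⟨i1, fun x hx => i2 x (Or.inl hx), i2 node (Or.inr rfl), i3, ?_, i5, by omega⟩
    intro y hy hyseen x hxg
    by_cases hyn : y = node
    · subst hyn
      exact hallF x hxg
    · exact i4 y hy hyseen hyn x hxg

-- loop step of B's worklist traversal, and the invariant carried through its fold
def stepB (p : PySem.Set Char × List Char) (n : Char) : PySem.Set Char × List Char :=
  if PySem.Set.contains p.1 n then p else (PySem.Set.add p.1 n, n :: p.2)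

def InvB (univ : List Char) (g : Char → List Char) (seen : PySem.Set Char)
    (node : Char) (rest : List Char) (q : PySem.Set Char × List Char) : Prop :=
  (∀ x ∈ q.2, x ∈ q.1) ∧
  (∀ x ∈ q.1, x ∈ seen ∨ x ∈ g node) ∧
  (∀ y ∈ q.1, y ∈ q.2 ∨ y = node ∨ ∀ x ∈ g y, x ∈ q.1) ∧
  (unseenN univ q.1 + q.2.length ≤ unseenN univ seen + rest.length) ∧
  (∀ x ∈ seen, x ∈ q.1) ∧
  (∀ x ∈ q.2, x ∈ rest ∨ x ∈ g node)

-- characterisation of B's worklist loop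
lemma loopB_spec (univ : List Char) (g : Char → List Char)
    (hGU : ∀ y, ∀ x ∈ g y, x ∈ univ)
    (data : PySem.Dict Char (List Char)) (hdata : ∀ x, data.getD x [] = g x) :
    ∀ (f : Nat) (seen : PySem.Set Char) (stack : List Char),
    (∀ x ∈ stack, x ∈ seen) →
    (∀ y ∈ seen, y ∈ stack ∨ ∀ x ∈ g y, x ∈ seen) →
    unseenN univ seen + stack.length < f →
    (∀ x ∈ seen, x ∈ loopB data f seen stack) ∧
    (∀ x ∈ loopB data f seen stack,
      x ∈ seen ∨ ∃ y ∈ stack, Relation.ReflTransGen (fun u v => v ∈ g u) y x) ∧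
    (∀ y ∈ loopB data f seen stack, ∀ x ∈ g y, x ∈ loopB data f seen stack) := by
  intro f
  induction f with
  | zero => intro seen stack _ _ hf; exact absurd hf (Nat.not_lt_zero _)
  | succ f IH =>
    intro seen stack hss hcl hf
    cases stack with
    | nil =>
      have hunf : loopB data (f + 1) seen [] = seen := rfl
      rw [hunf]
      refine ⟨fun x hx => hx, fun x hx => Or.inl hx, ?_⟩
      intro y hy x hx
      rcases hcl y hy with h | h
      · cases h
      · exact h x hx
    | cons node rest =>
      have hunf : loopB data (f + 1) seen (node :: rest)
          = loopB data f ((g node).foldl stepB (seen, rest)).1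
              ((g node).foldl stepB (seen, rest)).2 := by
        have h0 : loopB data (f + 1) seen (node :: rest)
            = loopB data f ((data.getD node []).foldl stepB (seen, rest)).1
                ((data.getD node []).foldl stepB (seen, rest)).2 := rfl
        rw [h0, hdata]
      have aux : ∀ (l : List Char), (∀ x ∈ l, x ∈ g node) →
          ∀ q, InvB univ g seen node rest q →
          InvB univ g seen node rest (l.foldl stepB q) ∧
          (∀ x ∈ q.1, x ∈ (l.foldl stepB q).1) ∧
          (∀ x ∈ l, x ∈ (l.foldl stepB q).1) := by
        intro l
        induction l with
        | nil =>
          intro _ q hq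
          exact ⟨hq, fun x hx => hx, by simp⟩
        | cons n l ihl =>
          intro hl q hq
          obtain ⟨qS, qT⟩ := q
          obtain ⟨j1, j2, j3, j4, j5, j6⟩ := hq
          have hnG : n ∈ g node := hl n List.mem_cons_self
          have hnU : n ∈ univ := hGU node n hnG
          rw [List.foldl_cons]
          by_cases hns : n ∈ qS
          · have hco : PySem.Set.contains (qS, qT).1 n = true := (set_contains_iff _ _).mpr hns
            have hse : stepB (qS, qT) n = (qS, qT) := by
              unfold stepB
              rw [if_pos hco]
            rw [hse]
            obtain ⟨ha, hb, hc⟩ := ihl (fun x hx => hl x (List.mem_cons_of_mem _ hx)) (qS, qT)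
              ⟨j1, j2, j3, j4, j5, j6⟩
            refine ⟨ha, hb, fun x hx => ?_⟩
            rcases List.mem_cons.mp hx with rfl | hx
            · exact hb _ hns
            · exact hc x hx
          · have hco : PySem.Set.contains (qS, qT).1 n = false := by
              rw [← Bool.not_eq_true]
              intro hc
              exact hns ((set_contains_iff _ _).mp hc)
            have hse : stepB (qS, qT) n = (PySem.Set.add qS n, n :: qT) := by
              unfold stepB
              rw [if_neg (by rw [hco]; exact Bool.false_ne_true)]
            rw [hse]
            replace j4 : unseenN univ qS + qT.length ≤ unseenN univ seen + rest.length := j4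
            have hsub : ∀ x ∈ qS, x ∈ PySem.Set.add qS n :=
              fun x hx => (PySem.Set.mem_add qS n x).mpr (Or.inl hx)
            have hmemn : n ∈ PySem.Set.add qS n := (PySem.Set.mem_add qS n n).mpr (Or.inr rfl)
            have hstrict : unseenN univ (PySem.Set.add qS n) < unseenN univ qS :=
              unseenN_strict univ qS _ n hnU hns hmemn hsub
            have hq' : InvB univ g seen node rest (PySem.Set.add qS n, n :: qT) := by
              refine ⟨?_, ?_, ?_, ?_, fun x hx => hsub x (j5 x hx), ?_⟩
              · intro x hx
                rcases List.mem_cons.mp hx with rfl | hx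
                · exact hmemn
                · exact hsub x (j1 x hx)
              · intro x hx
                rcases (PySem.Set.mem_add qS n x).mp hx with hx | rfl
                · exact j2 x hx
                · exact Or.inr hnG
              · intro y hy
                rcases (PySem.Set.mem_add qS n y).mp hy with hy | rfl
                · rcases j3 y hy with h | h | h
                  · exact Or.inl (List.mem_cons_of_mem _ h)
                  · exact Or.inr (Or.inl h)
                  · exact Or.inr (Or.inr (fun x hx => hsub x (h x hx)))
                · exact Or.inl List.mem_cons_self
              · show unseenN univ (PySem.Set.add qS n) + (n :: qT).length ≤
                  unseenN univ seen + rest.length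
                simp only [List.length_cons]
                omega
              · intro x hx
                rcases List.mem_cons.mp hx with rfl | hx
                · exact Or.inr hnG
                · exact j6 x hx
            obtain ⟨ha, hb, hc⟩ := ihl (fun x hx => hl x (List.mem_cons_of_mem _ hx)) _ hq'
            refine ⟨ha, fun x hx => hb x (hsub x hx), fun x hx => ?_⟩
            rcases List.mem_cons.mp hx with rfl | hx
            · exact hb _ hmemn
            · exact hc x hx
      have hq0 : InvB univ g seen node rest (seen, rest) := by
        refine ⟨?_, fun x hx => Or.inl hx, ?_, le_refl _, fun x hx => hx, fun x hx => Or.inl hx⟩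
        · intro x hx
          exact hss x (List.mem_cons_of_mem _ hx)
        · intro y hy
          rcases hcl y hy with h | h
          · rcases List.mem_cons.mp h with rfl | h
            · exact Or.inr (Or.inl rfl)
            · exact Or.inl h
          · exact Or.inr (Or.inr (fun x hx => h x hx))
      obtain ⟨⟨j1, j2, j3, j4, j5, j6⟩, hmono, hall⟩ :=
        aux (g node) (fun x hx => hx) (seen, rest) hq0
      set p := (g node).foldl stepB (seen, rest) with hp
      have hrec := IH p.1 p.2 j1 ?_ ?_
      · rw [hunf]
        obtain ⟨r1, r2, r3⟩ := hrec
        refine ⟨fun x hx => r1 x (j5 x hx), ?_, r3⟩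
        intro x hx
        rcases r2 x hx with hx' | ⟨y, hy, hr⟩
        · rcases j2 x hx' with h | h
          · exact Or.inl h
          · exact Or.inr ⟨node, List.mem_cons_self, Relation.ReflTransGen.single h⟩
        · rcases j6 y hy with h | h
          · exact Or.inr ⟨y, List.mem_cons_of_mem _ h, hr⟩
          · exact Or.inr ⟨node,
              List.mem_cons_self, Relation.ReflTransGen.head h hr⟩
      · intro y hy
        rcases j3 y hy with h | h | h
        · exact Or.inl h
        · subst h
          exact Or.inr (fun x hx => hall x hx)
        · exact Or.inr h
      · simp only [List.length_cons] at hf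
        omega

-- a closed set containing init contains everything reachable from init
lemma reach_subset (g : Char → List Char) (S : Char → Prop) (init : Char)
    (h0 : S init) (hcl : ∀ y, S y → ∀ x ∈ g y, S x) :
    ∀ x, Relation.ReflTransGen (fun u v => v ∈ g u) init x → S x := by
  intro x hx
  induction hx with
  | refl => exact h0
  | tail _ hbc ih => exact hcl _ ih _ hbc

-- A's starts/ends counters (defaultdict starting at 1)
lemma getD_foldl_modify_one (l : List Char) :
    ∀ (d : PySem.Dict Char Int) (v : Char),
    (l.foldl (fun d x => d.modify x 1 (· + 1)) d).getD v 1 = d.getD v 1 + l.count v := by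
  induction l with
  | nil => simp
  | cons a t ih =>
    intro d v
    rw [List.foldl_cons, ih, PySem.Dict.getD_modify, List.count_cons]
    by_cases hv : v = a
    · have hb : (a == v) = true := by simp [hv]
      rw [if_pos hv, hb, hv, if_pos rfl]
      push_cast
      ring
    · have hb : (a == v) = false := by simp; exact fun h => hv h.symm
      rw [if_neg hv, hb]
      simp

lemma countP_or_disjoint (l : List Char) (p q : Char → Bool)
    (hdisj : ∀ x ∈ l, ¬(p x = true ∧ q x = true)) :
    l.countP (fun x => p x || q x) = l.countP p + l.countP q := by
  induction l with
  | nil => simp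
  | cons b t ih =>
    simp only [List.countP_cons]
    rw [ih (fun x hx => hdisj x (List.mem_cons_of_mem _ hx))]
    have hb := hdisj b List.mem_cons_self
    have e1 : (if (p b || q b) = true then 1 else 0)
        = (if p b = true then 1 else 0) + (if q b = true then 1 else 0) := by
      by_cases h1 : p b = true
      · by_cases h2 : q b = true
        · exact absurd ⟨h1, h2⟩ hb
        · rw [Bool.not_eq_true] at h2
          simp [h1, h2]
      · rw [Bool.not_eq_true] at h1
        simp [h1]
    rw [e1]
    omega

-- sum of counts over a Nodup list = length of the filtered list
lemma sum_counts_eq_filter_length (S : List Char) (hS : S.Nodup) (l : List Char) :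
    (S.map (fun k => l.count k)).sum = (l.filter (fun x => decide (x ∈ S))).length := by
  induction S with
  | nil => simp
  | cons a S ih =>
    have hna : a ∉ S := (List.nodup_cons.mp hS).1
    have ihS := ih (List.nodup_cons.mp hS).2
    rw [List.map_cons, List.sum_cons, ihS, ← List.countP_eq_length_filter,
      ← List.countP_eq_length_filter, List.count_eq_countP]
    have hfun : (fun x => decide (x ∈ a :: S)) = (fun x : Char => (x == a) || decide (x ∈ S)) := by
      funext x
      by_cases h1 : x = a <;> by_cases h2 : x ∈ S <;> simp [h1, h2]
    rw [hfun, countP_or_disjoint l _ _ (by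
      rintro x _ ⟨hp, hq⟩
      rw [beq_iff_eq] at hp
      subst hp
      exact hna (by simpa using hq))]

-- the degree-sum argument: if every first-char is balanced, every last-char is a first-char
lemma lasts_subset_firsts (F L : List Char) (hlen : F.length = L.length)
    (hbal : ∀ k ∈ F, L.count k = F.count k) : ∀ x ∈ L, x ∈ F := by
  have h1 : ((F.dedup).map (fun k => F.count k)).sum = F.length := by
    simpa using List.sum_map_count_dedup_eq_length F
  have h2 : ((F.dedup).map (fun k => L.count k)).sum = F.length := by
    rw [List.map_congr_left (fun k hk => hbal k (List.mem_dedup.mp hk)), h1]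
  have h3 := sum_counts_eq_filter_length F.dedup F.nodup_dedup L
  have h4 : (L.filter (fun x => decide (x ∈ F.dedup))).length = L.length := by
    omega
  intro x hx
  have := (List.length_filter_eq_length_iff.mp h4) x hx
  exact List.mem_dedup.mp (by simpa using this)

lemma checkA_eq_all (seen : PySem.Set Char) (starts ends : PySem.Dict Char Int) :
    ∀ l : List Char, checkA seen starts ends l =
      l.all (fun n => PySem.Set.contains seen n && (starts.getD n 1 == ends.getD n 1)) := by
  intro l
  induction l with
  | nil => rfl
  | cons n rest ih =>
    simp only [checkA, List.all_cons, ih]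
    by_cases h1 : PySem.Set.contains seen n = true <;>
      by_cases h2 : starts.getD n (1 : Int) = ends.getD n (1 : Int) <;>
      simp [h1, h2]

-- the whole equivalence for a nonempty list of nonempty words
lemma solve_main (w0 : String) (ws : List String) (hws : ∀ w ∈ w0 :: ws, w ≠ "") :
    solve (w0 :: ws) = solve_alt (w0 :: ws) := by
  have hw0 : w0 ≠ "" := hws w0 List.mem_cons_self
  have hget0 : PySem.List.pyGet? (w0 :: ws) 0 = some w0 := list_pyGet?_zero w0 ws
  have hgetc : PySem.Str.pyGet? w0 0 = some (fstC w0) := str_pyGet?_zero w0 hw0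
  simp only [solve, solve_alt, hget0, hgetc]
  conv_lhs =>
    rw [PySem.List.foldl_congr_mem (w0 :: ws) _
      (fun st w => (st.1.modify (fstC w) [] (· ++ [lstC w]),
        st.2.1.modify (fstC w) (1 : Int) (· + 1), st.2.2.modify (lstC w) (1 : Int) (· + 1)))
      (PySem.Dict.empty, PySem.Dict.empty, PySem.Dict.empty)
      (fun acc x hx => by rw [str_pyGet?_zero x (hws x hx), str_pyGet?_neg_one x (hws x hx)])]
    rw [PySem.List.foldl_prod_mk
      (f := fun (d : PySem.Dict Char (List Char)) (w : String) =>
        d.modify (fstC w) [] (· ++ [lstC w]))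
      (g := fun (s : PySem.Dict Char Int × PySem.Dict Char Int) (w : String) =>
        (s.1.modify (fstC w) (1 : Int) (· + 1), s.2.modify (lstC w) (1 : Int) (· + 1)))]
    rw [PySem.List.foldl_prod_mk
      (f := fun (d : PySem.Dict Char Int) (w : String) => d.modify (fstC w) (1 : Int) (· + 1))
      (g := fun (d : PySem.Dict Char Int) (w : String) => d.modify (lstC w) (1 : Int) (· + 1))]
  conv_rhs =>
    rw [PySem.List.foldl_congr_mem (w0 :: ws) _
      (fun st w => (st.1.modify (fstC w) [] (· ++ [lstC w]),
        st.2.1.insert (fstC w) (st.2.1.getD (fstC w) (0 : Int) + 1),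
        st.2.2.insert (lstC w) (st.2.2.getD (lstC w) (0 : Int) + 1)))
      (PySem.Dict.empty, PySem.Dict.empty, PySem.Dict.empty)
      (fun acc x hx => by rw [str_pyGet?_zero x (hws x hx), str_pyGet?_neg_one x (hws x hx)])]
    rw [PySem.List.foldl_prod_mk
      (f := fun (d : PySem.Dict Char (List Char)) (w : String) =>
        d.modify (fstC w) [] (· ++ [lstC w]))
      (g := fun (s : PySem.Dict Char Int × PySem.Dict Char Int) (w : String) =>
        (s.1.insert (fstC w) (s.1.getD (fstC w) (0 : Int) + 1),
         s.2.insert (lstC w) (s.2.getD (lstC w) (0 : Int) + 1)))]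
    rw [PySem.List.foldl_prod_mk
      (f := fun (d : PySem.Dict Char Int) (w : String) =>
        d.insert (fstC w) (d.getD (fstC w) (0 : Int) + 1))
      (g := fun (d : PySem.Dict Char Int) (w : String) =>
        d.insert (lstC w) (d.getD (lstC w) (0 : Int) + 1))]
  dsimp only
  -- names for the common pieces
  set F : List Char := (w0 :: ws).map fstC with hFdef
  set L : List Char := (w0 :: ws).map lstC with hLdef
  set D : PySem.Dict Char (List Char) :=
    (w0 :: ws).foldl (fun d w => d.modify (fstC w) [] (· ++ [lstC w])) PySem.Dict.empty
    with hDdef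
  set sA : PySem.Dict Char Int :=
    (w0 :: ws).foldl (fun d w => d.modify (fstC w) (1 : Int) (· + 1)) PySem.Dict.empty
    with hsAdef
  set eA : PySem.Dict Char Int :=
    (w0 :: ws).foldl (fun d w => d.modify (lstC w) (1 : Int) (· + 1)) PySem.Dict.empty
    with heAdef
  set sB : PySem.Dict Char Int :=
    (w0 :: ws).foldl (fun d w => d.insert (fstC w) (d.getD (fstC w) (0 : Int) + 1))
      PySem.Dict.empty with hsBdef
  set eB : PySem.Dict Char Int :=
    (w0 :: ws).foldl (fun d w => d.insert (lstC w) (d.getD (lstC w) (0 : Int) + 1))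
      PySem.Dict.empty with heBdef
  have hlen : F.length = L.length := by rw [hFdef, hLdef]; simp
  -- counter values
  have hsAval : ∀ n, sA.getD n (1 : Int) = 1 + (F.count n : Int) := by
    intro n
    have h1 : sA = F.foldl (fun d x => d.modify x (1 : Int) (· + 1)) PySem.Dict.empty := by
      rw [hsAdef, hFdef]
      exact (List.foldl_map (f := fstC)
        (g := fun d x => d.modify x (1 : Int) (· + 1))
        (l := w0 :: ws) (init := PySem.Dict.empty)).symm
    rw [h1, getD_foldl_modify_one, PySem.Dict.getD_empty]
  have heAval : ∀ n, eA.getD n (1 : Int) = 1 + (L.count n : Int) := by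
    intro n
    have h1 : eA = L.foldl (fun d x => d.modify x (1 : Int) (· + 1)) PySem.Dict.empty := by
      rw [heAdef, hLdef]
      exact (List.foldl_map (f := lstC)
        (g := fun d x => d.modify x (1 : Int) (· + 1))
        (l := w0 :: ws) (init := PySem.Dict.empty)).symm
    rw [h1, getD_foldl_modify_one, PySem.Dict.getD_empty]
  have hsBval : ∀ n, sB.getD n (0 : Int) = (F.count n : Int) := by
    intro n
    have h1 : sB = F.foldl (fun d x => d.insert x (d.getD x (0 : Int) + 1)) PySem.Dict.empty := by
      rw [hsBdef, hFdef]
      exact (List.foldl_map (f := fstC)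
        (g := fun d x => d.insert x (d.getD x (0 : Int) + 1))
        (l := w0 :: ws) (init := PySem.Dict.empty)).symm
    rw [h1, PySem.Dict.getD_foldl_insert_add_one, PySem.Dict.getD_empty, zero_add]
  have heBval : ∀ n, eB.getD n (0 : Int) = (L.count n : Int) := by
    intro n
    have h1 : eB = L.foldl (fun d x => d.insert x (d.getD x (0 : Int) + 1)) PySem.Dict.empty := by
      rw [heBdef, hLdef]
      exact (List.foldl_map (f := lstC)
        (g := fun d x => d.insert x (d.getD x (0 : Int) + 1))
        (l := w0 :: ws) (init := PySem.Dict.empty)).symm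
    rw [h1, PySem.Dict.getD_foldl_insert_add_one, PySem.Dict.getD_empty, zero_add]
  -- the adjacency function and key set of D
  have hD2 : D = ((w0 :: ws).map (fun w => (fstC w, lstC w))).foldl
      (fun d p => d.modify p.1 [] (· ++ [p.2])) PySem.Dict.empty := by
    rw [hDdef]
    exact (List.foldl_map (f := fun w => (fstC w, lstC w))
      (g := fun d p => d.modify p.1 [] (· ++ [p.2]))
      (l := w0 :: ws) (init := PySem.Dict.empty)).symm
  have hg : ∀ x, D.getD x [] =
      (((w0 :: ws).map (fun w => (fstC w, lstC w))).filter (fun p => p.1 == x)).map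
        (fun p => p.2) := by
    intro x
    rw [hD2, PySem.Dict.getD_foldl_modify_append, PySem.Dict.getD_empty, List.nil_append]
  have hkeys : D.keys = PySem.Set.ofList F := by
    rw [hDdef, PySem.Dict.keys_foldl_modify_key (w0 :: ws) fstC ([] : List Char)
      (fun d w => (· ++ [lstC w])) PySem.Dict.empty, PySem.Dict.keys_empty, hFdef]
    exact (PySem.Set.ofList_eq_foldl _).symm
  have hGU : ∀ y, ∀ x ∈ D.getD y [], x ∈ F ++ L := by
    intro y x hx
    rw [hg] at hx
    obtain ⟨p, hp, rfl⟩ := List.mem_map.mp hx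
    have hpl : p ∈ (w0 :: ws).map (fun w => (fstC w, lstC w)) := List.mem_of_mem_filter hp
    obtain ⟨w, hw, rfl⟩ := List.mem_map.mp hpl
    refine List.mem_append_right _ ?_
    rw [hLdef]
    exact List.mem_map.mpr ⟨w, hw, rfl⟩
  have hgdef : ∀ x, D.getD x [] = (fun c => D.getD c []) x := fun _ => rfl
  have hinitF : fstC w0 ∈ F := by rw [hFdef]; exact List.mem_map.mpr ⟨w0, List.mem_cons_self, rfl⟩
  have hulen : (F ++ L).dedup.length ≤ (w0 :: ws).length + (w0 :: ws).length := by
    have h1 : (F ++ L).dedup.length ≤ (F ++ L).length := (List.dedup_sublist _).length_le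
    have h2 : (F ++ L).length = (w0 :: ws).length + (w0 :: ws).length := by
      rw [List.length_append, hFdef, hLdef]
      simp
    omega
  have hunn : ∀ s : PySem.Set Char, unseenN (F ++ L) s ≤ (w0 :: ws).length + (w0 :: ws).length :=
    fun s => le_trans (List.countP_le_length) hulen
  -- A's traversal
  obtain ⟨a1, a2, a3, a4, a5, a6, a7⟩ :=
    dfsA_spec (F ++ L) (fun c => D.getD c []) hGU (2 * (w0 :: ws).length + 1) D
      PySem.Set.empty (fstC w0) hgdef (List.mem_append_left _ hinitF)
      (List.not_mem_nil)
      (by have := hunn PySem.Set.empty; omega)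
  -- B's traversal
  obtain ⟨b1, b2, b3⟩ :=
    loopB_spec (F ++ L) (fun c => D.getD c []) hGU D hgdef (2 * (w0 :: ws).length + 2)
      (PySem.Set.add PySem.Set.empty (fstC w0)) [fstC w0]
      (fun x hx => by
        rcases List.mem_cons.mp hx with rfl | hx
        · exact (PySem.Set.mem_add _ _ _).mpr (Or.inr rfl)
        · cases hx)
      (fun y hy => by
        rcases (PySem.Set.mem_add _ _ _).mp hy with hy | rfl
        · cases hy
        · exact Or.inl List.mem_cons_self)
      (by
        have h1 := unseenN_mono (F ++ L) PySem.Set.empty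
          (PySem.Set.add PySem.Set.empty (fstC w0)) (fun x hx => by cases hx)
        have h2 := hunn PySem.Set.empty
        have h3 : ([fstC w0] : List Char).length = 1 := rfl
        rw [h3]
        omega)
  set RA := (dfsA (2 * (w0 :: ws).length + 1) (D, PySem.Set.empty) (fstC w0)).2 with hRAdef
  set DA := (dfsA (2 * (w0 :: ws).length + 1) (D, PySem.Set.empty) (fstC w0)).1 with hDAdef
  set SB := loopB D (2 * (w0 :: ws).length + 2)
      (PySem.Set.add PySem.Set.empty (fstC w0)) [fstC w0] with hSBdef
  -- both traversals see exactly the nodes reachable from init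
  have hRS : ∀ x, x ∈ RA ↔ x ∈ SB := by
    intro x
    constructor
    · intro hx
      rcases a4 x hx with hx' | hx'
      · cases hx'
      · refine reach_subset (fun c => D.getD c []) (· ∈ SB) (fstC w0) ?_ ?_ x hx'
        · exact b1 _ ((PySem.Set.mem_add _ _ _).mpr (Or.inr rfl))
        · exact fun y hy z hz => b3 y hy z hz
    · intro hx
      rcases b2 x hx with hx' | ⟨y, hy, hr⟩
      · rcases (PySem.Set.mem_add _ _ _).mp hx' with h | rfl
        · cases h
        · exact a3
      · rcases List.mem_cons.mp hy with rfl | h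
        · exact reach_subset (fun c => D.getD c []) (· ∈ RA) (fstC w0) a3
            (fun z hz w hw => a5 z hz (List.not_mem_nil) w hw) x hr
        · cases h
  -- membership in the final key list of A
  have hkeysA : ∀ x, x ∈ DA.keys ↔ (x ∈ F ∨ x ∈ RA) := by
    intro x
    rw [← PySem.Dict.contains_iff_mem_keys, a6 x, PySem.Dict.contains_iff_mem_keys, hkeys,
      PySem.Set.mem_ofList]
    constructor
    · rintro (h | ⟨h, _⟩)
      · exact Or.inl h
      · exact Or.inr h
    · rintro (h | h)
      · exact Or.inl h
      · exact Or.inr ⟨h, List.not_mem_nil⟩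
  -- finish: compare the two final checks
  rw [checkA_eq_all, Bool.eq_iff_iff, List.all_eq_true, List.all_eq_true]
  constructor
  · intro hA n hn
    rw [hkeys, PySem.Set.mem_ofList] at hn
    have hmem : n ∈ DA.keys := (hkeysA n).mpr (Or.inl hn)
    have := hA n hmem
    rw [Bool.and_eq_true, set_contains_iff, beq_iff_eq, hsAval, heAval] at this
    obtain ⟨h1, h2⟩ := this
    rw [Bool.and_eq_true, set_contains_iff, beq_iff_eq, hsBval, heBval]
    exact ⟨(hRS n).mp h1, by omega⟩
  · intro hB n hn
    have hBF : ∀ k, k ∈ F → k ∈ SB ∧ (F.count k : Int) = (L.count k : Int) := by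
      intro k hk
      have hmem : k ∈ D.keys := by rw [hkeys]; exact (PySem.Set.mem_ofList _ _).mpr hk
      have := hB k hmem
      rw [Bool.and_eq_true, set_contains_iff, beq_iff_eq, hsBval, heBval] at this
      exact this
    have hbal : ∀ k ∈ F, L.count k = F.count k := by
      intro k hk
      have := (hBF k hk).2
      omega
    rw [hkeysA] at hn
    rw [Bool.and_eq_true, set_contains_iff, beq_iff_eq, hsAval, heAval]
    rcases hn with hn | hn
    · obtain ⟨h1, h2⟩ := hBF n hn
      exact ⟨(hRS n).mpr h1, by omega⟩
    · refine ⟨hn, ?_⟩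
      by_cases hnF : n ∈ F
      · have := (hBF n hnF).2
        omega
      · have hnL : n ∉ L := fun hc => hnF (lasts_subset_firsts F L hlen hbal n hc)
        rw [List.count_eq_zero.mpr hnF, List.count_eq_zero.mpr hnL]

-- ===== VERDICT (by name: the statement is the Claim_ definition above) =====
theorem solve_spec : Claim_equal_solve := by
  intro words _hdom hpre
  obtain ⟨hne, hws⟩ := hpre
  unfold Spec_solve
  cases words with
  | nil => exact absurd rfl hne
  | cons w0 ws => exact solve_main w0 ws hws
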